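-- pv_equiv track=rewrite | github.com/PoojaSingh31github/DSA-Practice | unit4/DSA/backtracking/practce/removeSdjcentDuplicate.py | rremove
-- ===== SOURCE A (Python) =====
-- def rremove(s):
--     sb=""
--     n=len(s)
--     i=0
--     while i<n:
--         repeat = False
--         while i+1<n and s[i]==s[i+1]:
--             repeat = True
--             i+=1
--         if not repeat:
--             sb+=s[i]
--         i+=1
--     return sb
-- ===== SOURCE B (Python) =====
-- def rremove(s):
--     n = len(s)
--     return ''.join(
--         s[i] for i in range(n)
--         if (i == 0 or s[i] != s[i - 1]) and (i == n - 1 or s[i] != s[i + 1])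
--     )
-- ===== Notes on version B (the rewrite author's own statement) =====
-- stated objective: alternative
-- what changed: Replaced A's stateful run-scanning while loop (inner skip loop plus repeat flag and sb+= accumulation) by a stateless positional filter: keep s[i] exactly when it differs from both its left and right neighbour, joined in one pass over range(n).
import Mathlib
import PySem

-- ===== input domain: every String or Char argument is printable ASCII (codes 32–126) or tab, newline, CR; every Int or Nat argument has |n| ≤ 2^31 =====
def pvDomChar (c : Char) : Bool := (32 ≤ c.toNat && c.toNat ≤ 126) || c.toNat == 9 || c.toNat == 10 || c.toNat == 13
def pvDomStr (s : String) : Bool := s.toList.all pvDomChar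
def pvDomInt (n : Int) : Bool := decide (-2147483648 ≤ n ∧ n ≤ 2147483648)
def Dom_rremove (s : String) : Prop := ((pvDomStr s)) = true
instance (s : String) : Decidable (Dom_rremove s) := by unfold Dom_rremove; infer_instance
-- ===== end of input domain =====

-- B replaces A's stateful run-scanning loop (repeat flag, sb+= accumulation) by a
-- stateless positional filter: keep s[i] iff it differs from both neighbours.

-- ===== PORT A =====
-- inner while loop: given current char c and the rest, skip the run of equal
-- chars; returns (repeat flag, current char after skipping, remaining chars)
def rrA_inner (c : Char) : List Char → Bool × Char × List Char
  | [] => (false, c, [])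
  | d :: t =>
    if c == d then
      let r := rrA_inner d t
      (true, r.2.1, r.2.2)
    else (false, c, d :: t)

theorem rrA_inner_len (c : Char) (t : List Char) : (rrA_inner c t).2.2.length ≤ t.length := by
  induction t generalizing c with
  | nil => simp [rrA_inner]
  | cons d t ih =>
    simp only [rrA_inner]
    split
    · exact le_trans (ih d) (Nat.le_succ _)
    · simp

-- outer while loop with the accumulator sb
def rrA_outer (sb : List Char) : List Char → List Char
  | [] => sb
  | c :: t =>
    let r := rrA_inner c t
    rrA_outer (if r.1 then sb else sb ++ [r.2.1]) r.2.2
termination_by l => l.length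
decreasing_by
  simpa using Nat.lt_succ_of_le (rrA_inner_len c t)

def rremove (s : String) : String := String.ofList (rrA_outer [] s.toList)

-- ===== PORT B =====
-- Source B: join s[i] for i in range(n) if (i==0 or s[i]!=s[i-1]) and (i==n-1 or s[i]!=s[i+1]).
-- Indexing s[i] (always in range here) is rendered as getD; the guards mirror Source B's.
def rrB_keep (l : List Char) (i : Nat) : Option Char :=
  if (i == 0 || !(l.getD i ' ' == l.getD (i - 1) ' ')) &&
     (i == l.length - 1 || !(l.getD i ' ' == l.getD (i + 1) ' ')) then
    some (l.getD i ' ')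
  else none

def rremove_alt (s : String) : String :=
  String.ofList ((List.range s.toList.length).filterMap (rrB_keep s.toList))

-- ===== PRECONDITION & SPEC =====
def Spec_rremove (s : String) (out : String) : Prop := out = rremove_alt s
instance (s : String) (out : String) : Decidable (Spec_rremove s out) := by unfold Spec_rremove; infer_instance

-- ===== CLAIM (what is proved, stated in full; the proofs are below) =====
def Claim_equal_rremove : Prop := ∀ (s : String), Dom_rremove s → Spec_rremove s (rremove s)

-- ===== LEMMAS AND PROOFS =====

-- "kept at position j" with an explicit previous character (none = start of string),
-- and the two neighbour tests named
def rrPrevOk (p : Option Char) (c : Char) : Bool :=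
  match p with | none => true | some q => !(q == c)

def rrNextOk (t : List Char) (c : Char) : Bool :=
  match t with | [] => true | d :: _ => !(d == c)

def rrP_keep (p : Option Char) (l : List Char) (j : Nat) : Option Char :=
  if (if j = 0 then rrPrevOk p (l.getD 0 ' ') else !(l.getD j ' ' == l.getD (j - 1) ' ')) &&
     (j == l.length - 1 || !(l.getD j ' ' == l.getD (j + 1) ' ')) then
    some (l.getD j ' ')
  else none

def rrP (p : Option Char) (l : List Char) : List Char :=
  (List.range l.length).filterMap (rrP_keep p l)

-- induction skeleton matching A's outer loop (head, then dropWhile of the run)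
def rrG : List Char → Unit
  | [] => ()
  | c :: t => rrG (t.dropWhile (· == c))
termination_by l => l.length
decreasing_by
  simpa using Nat.lt_succ_of_le (List.length_dropWhile_le (· == c) t)

-- recursive form of the positional filter, carrying the previous character
def rrF (p : Option Char) : List Char → List Char
  | [] => []
  | c :: t => (if rrPrevOk p c && rrNextOk t c then [c] else []) ++ rrF (some c) t

theorem rrF_cons (p : Option Char) (c : Char) (t : List Char) :
    rrF p (c :: t) = (if rrPrevOk p c && rrNextOk t c then [c] else []) ++ rrF (some c) t := rfl

theorem rrB_keep_eq (l : List Char) (i : Nat) : rrB_keep l i = rrP_keep none l i := by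
  cases i with
  | zero => simp [rrB_keep, rrP_keep, rrPrevOk]
  | succ j => simp [rrB_keep, rrP_keep]

theorem rrP_keep_shift (p : Option Char) (c : Char) (t : List Char) (j : Nat) (hj : j < t.length) :
    rrP_keep p (c :: t) (j + 1) = rrP_keep (some c) t j := by
  cases j with
  | zero =>
    cases t with
    | nil => simp at hj
    | cons d u =>
      simp only [rrP_keep, rrPrevOk]
      by_cases hdc : d = c
      · cases u with
        | nil => simp [hdc]
        | cons e v => simp [hdc]
      · cases u with
        | nil => simp [hdc, Ne.symm hdc]
        | cons e v => simp [hdc, Ne.symm hdc]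
  | succ k =>
    simp only [rrP_keep]
    have h1 : (k + 1 + 1 == (c :: t).length - 1) = (k + 1 == t.length - 1) := by
      rw [Bool.eq_iff_iff]
      simp only [beq_iff_eq, List.length_cons]
      omega
    rw [h1]
    simp

theorem rrP_eq_rrF (l : List Char) : ∀ p, rrP p l = rrF p l := by
  induction l with
  | nil => intro p; simp [rrP, rrF]
  | cons c t ih =>
    intro p
    simp only [rrP, List.length_cons, List.range_succ_eq_map, List.filterMap_cons,
      List.filterMap_map]
    have hshift : (List.range t.length).filterMap (rrP_keep p (c :: t) ∘ (· + 1)) =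
        (List.range t.length).filterMap (rrP_keep (some c) t) := by
      apply List.filterMap_congr
      intro j hj
      exact rrP_keep_shift p c t j (List.mem_range.mp hj)
    have hrec : (List.range t.length).filterMap (rrP_keep (some c) t) = rrF (some c) t := by
      rw [← rrP]; exact ih _
    rw [hshift, hrec, rrF_cons]
    have hhead : rrP_keep p (c :: t) 0 =
        (if rrPrevOk p c && rrNextOk t c then some c else none) := by
      simp only [rrP_keep, List.getD_cons_zero]
      cases t with
      | nil => simp [rrNextOk]
      | cons d u =>
        have h2 : (0 == (c :: d :: u).length - 1) = false := by simp
        by_cases hcd : c = d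
        · simp [rrNextOk, hcd]
        · simp [rrNextOk, hcd, Ne.symm hcd]
    rw [hhead]
    cases hb : rrPrevOk p c && rrNextOk t c
    · have hnb : ¬(rrPrevOk p c = true ∧ rrNextOk t c = true) := by
        rw [← Bool.and_eq_true, hb]; simp
      simp
    · have hab : rrPrevOk p c = true ∧ rrNextOk t c = true := by
        rw [← Bool.and_eq_true]; exact hb
      simp

-- the previous character only matters through the head comparison
theorem rrF_irrel (p : Option Char) (c : Char) (t : List Char)
    (hp : rrPrevOk p c = true) :
    rrF p (c :: t) = rrF none (c :: t) := by
  rw [rrF_cons, rrF_cons, hp]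
  simp [rrPrevOk]

-- skipping a run: all of r equals c, and t' does not start with c
theorem rrF_skip (c : Char) (r t' : List Char)
    (hr : ∀ x ∈ r, x = c)
    (ht : ∀ d, t'.head? = some d → (d == c) = false) :
    rrF (some c) (r ++ t') = rrF none t' := by
  induction r with
  | nil =>
    cases t' with
    | nil => rfl
    | cons d u =>
      have hd : (d == c) = false := ht d rfl
      have hcd : (c == d) = false := by
        have : d ≠ c := by simpa using hd
        simp [Ne.symm this]
      exact rrF_irrel (some c) d u (by simp [rrPrevOk, hcd])
  | cons x r ih =>
    have hx : x = c := hr x (by simp)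
    subst hx
    rw [List.cons_append, rrF_cons]
    have hp : rrPrevOk (some x) x = false := by simp [rrPrevOk]
    rw [hp]
    simp only [Bool.false_and, Bool.false_eq_true]
    exact ih (fun y hy => hr y (by simp [hy]))

-- the inner while loop skips exactly the takeWhile-run, the repeat flag is
-- "the run was nonempty", and the current char stays (propositionally) c
theorem rrA_inner_eq (c : Char) (t : List Char) :
    rrA_inner c t = (!(t.takeWhile (· == c)).isEmpty, c, t.dropWhile (· == c)) := by
  induction t generalizing c with
  | nil => simp [rrA_inner]
  | cons d t ih =>
    simp only [rrA_inner]
    by_cases h : c = d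
    · subst h
      simp [ih]
    · have hb : (c == d) = false := by simp [h]
      have hb' : (d == c) = false := by simp [Ne.symm h]
      simp [hb, hb']

-- pull the accumulator out of the outer loop
theorem rrA_outer_acc (l : List Char) : ∀ (sb : List Char),
    rrA_outer sb l = sb ++ rrA_outer [] l := by
  induction l using rrG.induct with
  | case1 => intro sb; simp [rrA_outer]
  | case2 c t ih =>
    intro sb
    rw [rrA_outer, rrA_outer]
    simp only [rrA_inner_eq]
    cases h : (t.takeWhile (· == c)).isEmpty
    · simp only [Bool.not_false]
      rw [if_pos trivial, if_pos trivial]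
      exact ih sb
    · simp only [Bool.not_true]
      rw [if_neg (by simp), if_neg (by simp), ih (sb ++ [c]), ih ([] ++ [c])]
      simp

-- main induction: A's loop equals the recursive positional filter
theorem rrA_eq_rrF (l : List Char) : rrA_outer [] l = rrF none l := by
  induction l using rrG.induct with
  | case1 => simp [rrA_outer, rrF]
  | case2 c t ih =>
    rw [rrA_outer]
    simp only [rrA_inner_eq]
    have hdrop : ∀ d, (t.dropWhile (· == c)).head? = some d → (d == c) = false := by
      intro d hd
      have h := List.head?_dropWhile_not (· == c) t
      rw [hd] at h
      exact h
    have hsplit : t = t.takeWhile (· == c) ++ t.dropWhile (· == c) :=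
      (List.takeWhile_append_dropWhile (p := (· == c)) (l := t)).symm
    rw [rrF_cons]
    cases hrun : (t.takeWhile (· == c)).isEmpty
    · -- run nonempty: the flag is set, c is dropped on both sides
      have hne : t.takeWhile (· == c) ≠ [] := by
        intro h; rw [h] at hrun; simp at hrun
      obtain ⟨d, u, hdu⟩ := List.exists_cons_of_ne_nil hne
      have hdc : (d == c) = true := by
        have hmem : d ∈ t.takeWhile (· == c) := by rw [hdu]; simp
        simpa using List.mem_takeWhile_imp hmem
      have hnext : rrNextOk t c = false := by
        have ht : t = d :: (u ++ t.dropWhile (· == c)) := by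
          conv_lhs => rw [hsplit, hdu]
          simp
        rw [ht]
        simp only [rrNextOk, hdc, Bool.not_true]
      rw [hnext]
      simp only [Bool.not_false, Bool.and_false, Bool.false_eq_true]
      simp only [if_true, if_false, List.nil_append]
      have hall : ∀ x ∈ t.takeWhile (· == c), x = c := by
        intro x hx
        simpa using List.mem_takeWhile_imp hx
      calc rrA_outer [] (t.dropWhile (· == c))
          = rrF none (t.dropWhile (· == c)) := ih
        _ = rrF (some c) (t.takeWhile (· == c) ++ t.dropWhile (· == c)) :=
            (rrF_skip c _ _ hall hdrop).symm
        _ = rrF (some c) t := by rw [← hsplit]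
    · -- run empty: keep c on both sides; dropWhile t = t
      have htw : t.takeWhile (· == c) = [] := by simpa [List.isEmpty_iff] using hrun
      have hdw : t.dropWhile (· == c) = t := by
        conv_rhs => rw [hsplit]
        simp [htw]
      have hhd : ∀ d u, t = d :: u → (d == c) = false := by
        intro d u hdu
        by_contra h
        have hdc : (d == c) = true := by simpa using h
        rw [hdu] at htw
        simp [hdc] at htw
      have hnext : rrNextOk t c = true := by
        cases t with
        | nil => rfl
        | cons d u => simp only [rrNextOk, hhd d u rfl, Bool.not_false]
      rw [hdw] at ih
      rw [hnext, hdw]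
      simp only [Bool.not_true, Bool.false_eq_true]
      have hcond : (rrPrevOk none c && true) = true := rfl
      simp only [hcond, if_true, if_false, List.nil_append]
      rw [rrA_outer_acc, ih]
      simp only [List.singleton_append, List.cons.injEq, true_and]
      cases t with
      | nil => rfl
      | cons d u =>
        have hcd : (c == d) = false := by
          have : d ≠ c := by simpa using hhd d u rfl
          simp [Ne.symm this]
        exact ((rrF_irrel (some c) d u (by simp [rrPrevOk, hcd]))).symm

-- ===== VERDICT (by name: the statement is the Claim_ definition above) =====
theorem rremove_spec : Claim_equal_rremove := by
  intro s _
  unfold Spec_rremove rremove rremove_alt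
  have h : (List.range s.toList.length).filterMap (rrB_keep s.toList) = rrP none s.toList := by
    unfold rrP
    exact List.filterMap_congr (fun i _ => rrB_keep_eq s.toList i)
  rw [h, rrP_eq_rrF, rrA_eq_rrF]
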